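-- pv_equiv track=rewrite | github.com/lljqy/fetch_tickets | apps/_12306/quick_spider.py | _js_bit_xor
-- ===== SOURCE A (Python) =====
-- def _js_bit_xor(a: int, b: int) -> int:
--     bit_limit = 32
--     bit_length_a, bit_length_b = a.bit_length(), b.bit_length()
--     value = a ^ b
--     if bit_length_a < bit_limit and bit_length_b < bit_limit:
--         return value
--     compensate_code = format(value, "064b")
--     coe = 1 if value > 0 else -1
--     bit_code = compensate_code[-32:]
--     if bit_code[0] == "0":
--         return int(bit_code, base=2) * coe
--     bit_code = "".join(["0" if bit == "1" else "1" for bit in bit_code])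
--     return -(int(bit_code, base=2) + 1) * coe
-- ===== SOURCE B (Python) =====
-- def _js_bit_xor(a: int, b: int) -> int:
--     if a.bit_length() < 32 and b.bit_length() < 32:
--         return a ^ b
--     v = a ^ b
--     low = abs(v) & 0xFFFFFFFF
--     if low >= 0x80000000:
--         low -= 0x100000000
--     return low if v > 0 else -low
-- ===== Notes on version B (the rewrite author's own statement) =====
-- stated objective: simpler
-- what changed: Replaces A's 64-bit binary string formatting, slicing and digit-inversion comprehension with pure integer arithmetic: mask the magnitude's low 32 bits and reinterpret them as a signed 32-bit value, negated when the xor is non-positive.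
import Mathlib
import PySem

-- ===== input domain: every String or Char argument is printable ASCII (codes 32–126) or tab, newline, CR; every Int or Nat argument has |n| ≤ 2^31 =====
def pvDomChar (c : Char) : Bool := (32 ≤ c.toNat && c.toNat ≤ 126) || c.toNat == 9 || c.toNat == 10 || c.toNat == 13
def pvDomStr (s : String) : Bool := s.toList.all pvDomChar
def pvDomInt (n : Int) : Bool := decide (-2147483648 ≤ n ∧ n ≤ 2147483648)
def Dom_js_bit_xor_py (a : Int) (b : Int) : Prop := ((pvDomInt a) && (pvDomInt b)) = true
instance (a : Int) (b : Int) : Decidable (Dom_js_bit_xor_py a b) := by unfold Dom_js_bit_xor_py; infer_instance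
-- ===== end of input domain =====

-- B replaces A's 64-char binary-string formatting/slicing/inversion with plain integer
-- arithmetic on the magnitude's low 32 bits (same values everywhere; not claimed faster).

-- ===== PORT A =====
-- int(s, base=2), ported by hand as the standard binary left fold (PySem's ofStrBase?
-- hides private helpers unusable in proofs): exact = int(s, 2) on every nonempty string
-- of '0'/'1' characters, which is the only shape this function ever feeds it
-- (bit_code is 32 chars cut from the tail of a zfill-64 binary string).
def pyIntBase2 (cs : List Char) : Int :=
  cs.foldl (fun acc c => 2 * acc + (if c = '1' then 1 else 0)) 0

-- format(value, "064b") is sign-aware zero padding to width 64 = zfill of format(value, "b").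
def js_bit_xor_py (a : Int) (b : Int) : Int :=
  let bitLimit : Nat := 32
  let bitLengthA := PySem.Int.bitLength a
  let bitLengthB := PySem.Int.bitLength b
  let value := PySem.Int.bxor a b
  if bitLengthA < bitLimit ∧ bitLengthB < bitLimit then value
  else
    let compensateCode : List Char := PySem.Chars.zfill (PySem.Int.toBinChars value) 64
    let coe : Int := if 0 < value then 1 else -1
    let bitCode := PySem.List.slice compensateCode (some (-32)) none
    if PySem.List.pyGet? bitCode 0 = some '0' then
      pyIntBase2 bitCode * coe
    else
      let bitCode2 := bitCode.map (fun bit => if bit = '1' then '0' else '1');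
      -(pyIntBase2 bitCode2 + 1) * coe

-- ===== PORT B =====
def js_bit_xor_py_alt (a : Int) (b : Int) : Int :=
  if PySem.Int.bitLength a < 32 ∧ PySem.Int.bitLength b < 32 then PySem.Int.bxor a b
  else
    let v := PySem.Int.bxor a b
    let low0 := PySem.Int.band (v.natAbs : Int) 0xFFFFFFFF
    let low := if (0x80000000 : Int) ≤ low0 then low0 - 0x100000000 else low0
    if 0 < v then low else -low

-- ===== PRECONDITION & SPEC =====
def Spec_js_bit_xor_py (a : Int) (b : Int) (out : Int) : Prop := out = js_bit_xor_py_alt a b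
instance (a : Int) (b : Int) (out : Int) : Decidable (Spec_js_bit_xor_py a b out) := by unfold Spec_js_bit_xor_py; infer_instance

-- ===== CLAIM (what is proved, stated in full; the proofs are below) =====
def Claim_equal_js_bit_xor_py : Prop := ∀ (a : Int) (b : Int), Dom_js_bit_xor_py a b → Spec_js_bit_xor_py a b (js_bit_xor_py a b)

-- ===== LEMMAS AND PROOFS =====

def bitN (c : Char) : Nat := if c = '1' then 1 else 0

def parseN (cs : List Char) : Nat := cs.foldl (fun x c => 2 * x + bitN c) 0

def allBin (cs : List Char) : Prop := ∀ c ∈ cs, c = '0' ∨ c = '1'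

lemma foldl_parse (cs : List Char) : ∀ a : Nat,
    cs.foldl (fun x c => 2 * x + bitN c) a = a * 2 ^ cs.length + parseN cs := by
  induction cs with
  | nil => intro a; simp [parseN]
  | cons c cs ih =>
    intro a
    have h2 : parseN (c :: cs) = bitN c * 2 ^ cs.length + parseN cs := by
      show List.foldl _ (2 * 0 + bitN c) cs = _
      rw [Nat.mul_zero, Nat.zero_add, ih]
    rw [List.foldl_cons, ih, h2, List.length_cons, pow_succ]
    ring

lemma parseN_cons (c : Char) (cs : List Char) :
    parseN (c :: cs) = bitN c * 2 ^ cs.length + parseN cs := by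
  show List.foldl _ (2 * 0 + bitN c) cs = _
  rw [Nat.mul_zero, Nat.zero_add, foldl_parse]

lemma parseN_append (xs ys : List Char) :
    parseN (xs ++ ys) = parseN xs * 2 ^ ys.length + parseN ys := by
  unfold parseN
  rw [List.foldl_append, foldl_parse]
  rfl

lemma parseN_replicate (k : Nat) : parseN (List.replicate k '0') = 0 := by
  induction k with
  | zero => simp [parseN]
  | succ k ih =>
    rw [List.replicate_succ, parseN_cons, ih]
    simp [bitN]

lemma parseN_lt (cs : List Char) (h : allBin cs) : parseN cs < 2 ^ cs.length := by
  induction cs with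
  | nil => simp [parseN]
  | cons c cs ih =>
    have hb : bitN c ≤ 1 := by
      rcases h c List.mem_cons_self with rfl | rfl <;> simp [bitN]
    have hp := ih (fun x hx => h x (List.mem_cons_of_mem _ hx))
    rw [parseN_cons, List.length_cons, pow_succ]
    calc bitN c * 2 ^ cs.length + parseN cs
        ≤ 1 * 2 ^ cs.length + parseN cs := by
          exact Nat.add_le_add_right (Nat.mul_le_mul_right _ hb) _
      _ < 2 ^ cs.length + 2 ^ cs.length := by omega
      _ = 2 ^ cs.length * 2 := by ring

lemma parseN_map_inv (cs : List Char) (h : allBin cs) :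
    parseN (cs.map (fun bit => if bit = '1' then '0' else '1')) = 2 ^ cs.length - 1 - parseN cs := by
  induction cs with
  | nil => simp [parseN]
  | cons c cs ih =>
    have hp := parseN_lt cs (fun x hx => h x (List.mem_cons_of_mem _ hx))
    have ih' := ih (fun x hx => h x (List.mem_cons_of_mem _ hx))
    have ht : 1 ≤ 2 ^ cs.length := Nat.one_le_two_pow
    rw [List.map_cons, parseN_cons, parseN_cons, List.length_map, List.length_cons, pow_succ, ih']
    rcases h c List.mem_cons_self with rfl | rfl <;> simp [bitN] <;> omega

lemma allBin_drop (cs : List Char) (h : allBin cs) (k : Nat) : allBin (cs.drop k) :=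
  fun c hc => h c (List.drop_subset k cs hc)

lemma parseN_drop32 (cs : List Char) (h : allBin cs) (hl : 32 ≤ cs.length) :
    (cs.drop (cs.length - 32)).length = 32 ∧
    parseN (cs.drop (cs.length - 32)) = parseN cs % 2 ^ 32 := by
  have hlen : (cs.drop (cs.length - 32)).length = 32 := by
    rw [List.length_drop]; omega
  refine ⟨hlen, ?_⟩
  have hd := parseN_lt _ (allBin_drop cs h (cs.length - 32))
  rw [hlen] at hd
  conv_rhs => rw [← List.take_append_drop (cs.length - 32) cs]
  rw [parseN_append, hlen]
  have h232 : (2 : Nat) ^ 32 = 4294967296 := by norm_num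
  rw [h232] at hd ⊢
  omega

-- binary digit list of n, most significant first (what Nat.toDigits 2 computes)
def binDigits (n : Nat) : List Char :=
  if _h : n < 2 then [Nat.digitChar n]
  else binDigits (n / 2) ++ [Nat.digitChar (n % 2)]
termination_by n
decreasing_by exact Nat.div_lt_self (by omega) (by norm_num)

lemma binDigits_allBin (n : Nat) : allBin (binDigits n) := by
  induction n using Nat.strong_induction_on with
  | _ n ih =>
    rw [binDigits]
    split
    · rename_i h
      intro c hc
      rw [List.mem_singleton] at hc
      subst hc
      interval_cases n <;> simp [Nat.digitChar]
    · rename_i h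
      intro c hc
      rcases List.mem_append.mp hc with hc | hc
      · exact ih (n / 2) (Nat.div_lt_self (by omega) (by norm_num)) c hc
      · rw [List.mem_singleton] at hc
        subst hc
        have h2 : n % 2 = 0 ∨ n % 2 = 1 := by omega
        rcases h2 with h2 | h2 <;> rw [h2] <;> simp [Nat.digitChar]

lemma binDigits_ne_nil (n : Nat) : binDigits n ≠ [] := by
  rw [binDigits]
  split <;> simp

lemma parseN_singleton (c : Char) : parseN [c] = bitN c := by
  simp [parseN]

lemma binDigits_parse (n : Nat) : parseN (binDigits n) = n := by
  induction n using Nat.strong_induction_on with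
  | _ n ih =>
    rw [binDigits]
    split
    · rename_i h
      interval_cases n <;> decide
    · rename_i h
      rw [parseN_append, ih (n / 2) (Nat.div_lt_self (by omega) (by norm_num)),
        parseN_singleton, List.length_singleton, pow_one]
      have h2 : n % 2 = 0 ∨ n % 2 = 1 := by omega
      rcases h2 with h2 | h2 <;> rw [h2] <;> simp [bitN, Nat.digitChar] <;> omega

lemma toDigitsCore_eq : ∀ (f n : Nat) (acc : List Char), n < f →
    Nat.toDigitsCore 2 f n acc = binDigits n ++ acc := by
  intro f
  induction f with
  | zero => intro n acc h; omega
  | succ f ih =>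
    intro n acc h
    simp only [Nat.toDigitsCore]
    by_cases h2 : n / 2 = 0
    · rw [if_pos h2]
      have hn : n < 2 := by omega
      rw [binDigits, dif_pos hn]
      have : n % 2 = n := by omega
      rw [this]
      rfl
    · rw [if_neg h2]
      have hn : 2 ≤ n := by omega
      rw [ih (n / 2) _ (by omega)]
      conv_rhs => rw [binDigits, dif_neg (by omega : ¬ n < 2)]
      simp

lemma toDigits_two_eq (n : Nat) : Nat.toDigits 2 n = binDigits n := by
  unfold Nat.toDigits
  rw [toDigitsCore_eq (n + 1) n [] (Nat.lt_succ_self n), List.append_nil]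

lemma toBinChars_nonneg (v : Int) (h : 0 ≤ v) :
    PySem.Int.toBinChars v = binDigits v.natAbs := by
  rw [PySem.Int.toBinChars, if_neg (by omega : ¬ v < 0), toDigits_two_eq]
  congr 1
  omega

lemma toBinChars_neg (v : Int) (h : v < 0) :
    PySem.Int.toBinChars v = '-' :: binDigits v.natAbs := by
  rw [PySem.Int.toBinChars, if_pos h, toDigits_two_eq]

lemma zfill_bin (ds : List Char) (h : allBin ds) (hne : ds ≠ []) :
    PySem.Chars.zfill ds 64 = List.replicate (64 - ds.length) '0' ++ ds := by
  obtain ⟨c, rest, rfl⟩ := List.exists_cons_of_ne_nil hne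
  unfold PySem.Chars.zfill
  by_cases hl : (64 : Int) ≤ ((c :: rest).length : Int)
  · rw [if_pos hl]
    have : 64 - (c :: rest).length = 0 := by
      have : (64 : Nat) ≤ (c :: rest).length := by exact_mod_cast hl
      omega
    rw [this, List.replicate_zero, List.nil_append]
  · rw [if_neg hl]
    have hc : ¬ (c = '+' ∨ c = '-') := by
      rcases h c List.mem_cons_self with rfl | rfl <;> decide
    simp only [if_neg hc]
    rfl

lemma zfill_sign (ds : List Char) :
    PySem.Chars.zfill ('-' :: ds) 64 = '-' :: (List.replicate (64 - (ds.length + 1)) '0' ++ ds) := by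
  unfold PySem.Chars.zfill
  by_cases hl : (64 : Int) ≤ (('-' :: ds).length : Int)
  · rw [if_pos hl]
    have : 64 - (ds.length + 1) = 0 := by
      have : (64 : Nat) ≤ ('-' :: ds).length := by exact_mod_cast hl
      simp only [List.length_cons] at this
      omega
    rw [this, List.replicate_zero, List.nil_append]
  · rw [if_neg hl]
    rfl

lemma foldl_int_eq (cs : List Char) : ∀ a : Nat,
    cs.foldl (fun acc c => 2 * acc + (if c = '1' then 1 else 0)) ((a : Nat) : Int)
      = ((cs.foldl (fun x c => 2 * x + bitN c) a : Nat) : Int) := by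
  induction cs with
  | nil => intro a; simp
  | cons c cs ih =>
    intro a
    rw [List.foldl_cons, List.foldl_cons]
    have : (2 * ((a : Nat) : Int) + (if c = '1' then 1 else 0)) = (((2 * a + bitN c : Nat)) : Int) := by
      by_cases hc : c = '1' <;> simp [hc, bitN]
    rw [this, ih]

lemma pyIntBase2_eq (cs : List Char) : pyIntBase2 cs = ((parseN cs : Nat) : Int) := by
  have := foldl_int_eq cs 0
  simpa [pyIntBase2, parseN] using this

lemma mask_eq (m : Nat) : PySem.Int.band ((m : Nat) : Int) 0xFFFFFFFF = ((m % 2 ^ 32 : Nat) : Int) := by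
  have h1 : (0xFFFFFFFF : Int) = (((4294967295 : Nat)) : Int) := by norm_num
  rw [h1, PySem.Int.band_natCast]
  congr 1
  have : (4294967295 : Nat) = 2 ^ 32 - 1 := by norm_num
  rw [this, Nat.and_two_pow_sub_one_eq_mod]

lemma tail_branch (v : Int) (cs0 : List Char) (hb : allBin cs0) (hl : 32 ≤ cs0.length)
    (hp : parseN cs0 = v.natAbs) :
    (if PySem.List.pyGet? (cs0.drop (cs0.length - 32)) 0 = some '0' then
        pyIntBase2 (cs0.drop (cs0.length - 32)) * (if 0 < v then (1 : Int) else -1)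
      else
        -(pyIntBase2 ((cs0.drop (cs0.length - 32)).map fun bit => if bit = '1' then '0' else '1') + 1) *
          (if 0 < v then (1 : Int) else -1))
    = (if 0 < v then
        (if (0x80000000 : Int) ≤ PySem.Int.band (v.natAbs : Int) 0xFFFFFFFF then
          PySem.Int.band (v.natAbs : Int) 0xFFFFFFFF - 0x100000000
        else PySem.Int.band (v.natAbs : Int) 0xFFFFFFFF)
      else
        -(if (0x80000000 : Int) ≤ PySem.Int.band (v.natAbs : Int) 0xFFFFFFFF then
          PySem.Int.band (v.natAbs : Int) 0xFFFFFFFF - 0x100000000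
        else PySem.Int.band (v.natAbs : Int) 0xFFFFFFFF)) := by
  obtain ⟨hL32, hP32⟩ := parseN_drop32 cs0 hb hl
  have hB32 : allBin (cs0.drop (cs0.length - 32)) := allBin_drop cs0 hb _
  set tl := cs0.drop (cs0.length - 32) with htl
  rw [hp] at hP32
  rw [mask_eq]
  set p := v.natAbs % 2 ^ 32 with hpdef
  have hplt : p < 2 ^ 32 := Nat.mod_lt _ (by norm_num)
  obtain ⟨hch, rest, hcons⟩ := List.exists_cons_of_ne_nil
    (show tl ≠ [] by intro h0; rw [h0] at hL32; simp at hL32)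
  have hrest : rest.length = 31 := by
    rw [hcons] at hL32; simp at hL32; omega
  have hrb : allBin rest := fun x hx => hB32 x (hcons ▸ List.mem_cons_of_mem _ hx)
  have hrlt : parseN rest < 2 ^ 31 := by
    have := parseN_lt rest hrb
    rwa [hrest] at this
  have hsplit : parseN tl = bitN hch * 2 ^ 31 + parseN rest := by
    rw [hcons, parseN_cons, hrest]
  rw [hcons, PySem.List.pyGet?_zero_cons]
  rcases hB32 hch (hcons ▸ List.mem_cons_self) with rfl | rfl
  · -- leading bit '0': value < 2^31
    rw [if_pos rfl]
    have hp31 : p < 2 ^ 31 := by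
      rw [← hP32, hsplit, show bitN '0' = 0 from rfl]
      omega
    have hnotge : ¬ ((0x80000000 : Int) ≤ ((p : Nat) : Int)) := by
      have : p < 2147483648 := by
        have : (2 : Nat) ^ 31 = 2147483648 := by norm_num
        omega
      omega
    rw [if_neg hnotge, ← hcons, pyIntBase2_eq, hP32]
    by_cases hv : 0 < v <;> simp [hv]
  · -- leading bit '1': value ≥ 2^31, two's-complement negative
    rw [if_neg (by decide)]
    have hp31 : 2 ^ 31 ≤ p := by
      rw [← hP32, hsplit, show bitN '1' = 1 from rfl]
      omega
    have hge : ((0x80000000 : Int) ≤ ((p : Nat) : Int)) := by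
      have : 2147483648 ≤ p := by
        have : (2 : Nat) ^ 31 = 2147483648 := by norm_num
        omega
      omega
    rw [if_pos hge, ← hcons, pyIntBase2_eq, parseN_map_inv tl hB32, hL32, hP32]
    have hcast : ((2 ^ 32 - 1 - p : Nat) : Int) = 4294967295 - (p : Int) := by
      have h232 : (2 : Nat) ^ 32 = 4294967296 := by norm_num
      omega
    rw [hcast]
    by_cases hv : 0 < v <;> simp [hv] <;> ring

lemma allBin_pad (k : Nat) (ds : List Char) (h : allBin ds) :
    allBin (List.replicate k '0' ++ ds) := by
  intro c hc
  rcases List.mem_append.mp hc with hc | hc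
  · exact Or.inl (List.eq_of_mem_replicate hc)
  · exact h c hc

lemma parseN_pad (k : Nat) (ds : List Char) :
    parseN (List.replicate k '0' ++ ds) = parseN ds := by
  rw [parseN_append, parseN_replicate]
  ring

lemma main_eq (a b : Int) : js_bit_xor_py a b = js_bit_xor_py_alt a b := by
  by_cases hg : PySem.Int.bitLength a < 32 ∧ PySem.Int.bitLength b < 32
  · simp only [js_bit_xor_py, js_bit_xor_py_alt, if_pos hg]
  · simp only [js_bit_xor_py, js_bit_xor_py_alt, if_neg hg]
    generalize PySem.Int.bxor a b = v
    by_cases hneg : v < 0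
    · rw [toBinChars_neg v hneg, zfill_sign _,
        PySem.List.slice_from_neg_ofNat _ 32 (by norm_num)]
      have h1 : 1 ≤ (binDigits v.natAbs).length :=
        List.length_pos_of_ne_nil (binDigits_ne_nil _)
      set ds := binDigits v.natAbs with hds
      set cs0 := List.replicate (64 - (ds.length + 1)) '0' ++ ds with hcs0
      have hlen : 32 ≤ cs0.length := by
        rw [hcs0, List.length_append, List.length_replicate]
        omega
      have hdrop : ('-' :: cs0).drop (('-' :: cs0).length - 32) = cs0.drop (cs0.length - 32) := by
        rw [List.length_cons, show cs0.length + 1 - 32 = (cs0.length - 32) + 1 from by omega,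
          List.drop_succ_cons]
      rw [hdrop]
      exact tail_branch v cs0 (allBin_pad _ _ (binDigits_allBin _)) hlen
        (by rw [hcs0, parseN_pad, hds, binDigits_parse])
    · have hpos : 0 ≤ v := by omega
      rw [toBinChars_nonneg v hpos, zfill_bin _ (binDigits_allBin _) (binDigits_ne_nil _),
        PySem.List.slice_from_neg_ofNat _ 32 (by norm_num)]
      have h1 : 1 ≤ (binDigits v.natAbs).length :=
        List.length_pos_of_ne_nil (binDigits_ne_nil _)
      set ds := binDigits v.natAbs with hds
      set cs0 := List.replicate (64 - ds.length) '0' ++ ds with hcs0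
      have hlen : 32 ≤ cs0.length := by
        rw [hcs0, List.length_append, List.length_replicate]
        omega
      exact tail_branch v cs0 (allBin_pad _ _ (binDigits_allBin _)) hlen
        (by rw [hcs0, parseN_pad, hds, binDigits_parse])

-- ===== VERDICT (by name: the statement is the Claim_ definition above) =====
theorem js_bit_xor_py_spec : Claim_equal_js_bit_xor_py := by
  intro a b _
  show js_bit_xor_py a b = js_bit_xor_py_alt a b
  exact main_eq a b
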